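-- pv_equiv track=rewrite | github.com/twoju/Algorithm | 백준/Gold/1407. 2로 몇 번 나누어질까/2로 몇 번 나누어질까.py | func
-- ===== SOURCE A (Python) =====
-- def func(n):
--     ans = n
--     i = 2
--     while True:
--         if i > n:
--             break
--         ans += (n // i) * (i // 2)
--         i *= 2
--     return ans
-- ===== SOURCE B (Python) =====
-- def func(n):
--     # each odd k up to n contributes one; each even k contributes twice what
--     # its half contributes, so the total obeys S(n) = (n - n//2) + 2*S(n//2)
--     if n <= 1:
--         return n
--     return (n - n // 2) + 2 * func(n // 2)
-- ===== Notes on version B (the rewrite author's own statement) =====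
-- stated objective: alternative
-- what changed: Replaces A's iterative accumulation of (n//i)*(i//2) over successively doubled powers of two with a divide-and-conquer recurrence on n itself: the odd numbers up to n contribute one each and the even numbers form twice the halved problem, giving S(n) = (n - n//2) + 2*S(n//2).
import Mathlib
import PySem

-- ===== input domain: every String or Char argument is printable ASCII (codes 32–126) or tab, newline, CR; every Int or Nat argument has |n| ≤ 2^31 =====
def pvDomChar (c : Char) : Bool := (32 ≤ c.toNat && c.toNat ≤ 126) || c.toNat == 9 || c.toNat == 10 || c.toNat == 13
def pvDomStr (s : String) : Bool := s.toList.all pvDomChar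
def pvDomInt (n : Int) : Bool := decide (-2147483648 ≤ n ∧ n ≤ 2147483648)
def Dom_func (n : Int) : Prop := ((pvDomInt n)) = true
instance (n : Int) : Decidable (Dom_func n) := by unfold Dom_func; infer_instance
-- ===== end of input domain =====

-- B replaces A's iterative per-power-of-two accumulation with a divide-and-conquer halving recurrence S(n) = (n - n//2) + 2*S(n//2) (alternative algorithm, same asymptotic cost).

-- ===== PORT A =====
-- while True: if i > n: break; ans += (n // i) * (i // 2); i *= 2
-- (i starts at 2 and doubles, so it stays positive; the positivity argument only justifies termination)
def funcLoop (n ans i : Int) (hi : 0 < i) : Int :=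
  if i > n then ans
  else funcLoop n (ans + PySem.Int.floordiv n i * PySem.Int.floordiv i 2) (i * 2) (by omega)
termination_by (n + 1 - i).toNat
decreasing_by omega

def func (n : Int) : Int := funcLoop n n 2 (by norm_num)

-- ===== PORT B =====
-- if n <= 1: return n ; return (n - n // 2) + 2 * func(n // 2)
def func_alt (n : Int) : Int :=
  if _h : n ≤ 1 then n
  else (n - PySem.Int.floordiv n 2) + 2 * func_alt (PySem.Int.floordiv n 2)
termination_by n.toNat
decreasing_by
  rw [PySem.Int.floordiv_eq_ediv_of_pos (by norm_num)]
  omega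

-- ===== PRECONDITION & SPEC =====
def Spec_func (n : Int) (out : Int) : Prop := out = func_alt n
instance (n : Int) (out : Int) : Decidable (Spec_func n out) := by unfold Spec_func; infer_instance

-- ===== CLAIM (what is proved, stated in full; the proofs are below) =====
def Claim_equal_func : Prop := ∀ (n : Int), Dom_func n → Spec_func n (func n)

-- ===== LEMMAS AND PROOFS =====

-- Nat shadow of A's loop (ans dropped; i kept as a Nat)
def loopN (m i : ℕ) : ℕ :=
  if _h : i = 0 then 0
  else if m < i then 0 else m / i * (i / 2) + loopN m (2 * i)
termination_by m + 1 - i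
decreasing_by omega

-- A's loop equals its Nat shadow
theorem loopN_eq (m i : ℕ) (hi : i ≠ 0) :
    loopN m i = if m < i then 0 else m / i * (i / 2) + loopN m (2 * i) := by
  rw [loopN, dif_neg hi]

theorem funcLoop_congr (n ans : Int) {i j : Int} (h : i = j) (hi : 0 < i) (hj : 0 < j) :
    funcLoop n ans i hi = funcLoop n ans j hj := by
  subst h; rfl

theorem funcLoop_loopN (m : ℕ) : ∀ (i : ℕ) (ans : Int) (hi : 0 < (↑i : Int)),
    funcLoop (↑m) ans (↑i) hi = ans + ↑(loopN m i) := by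
  intro i
  induction i using loopN.induct (m := m) with
  | case1 => intro ans hi; simp at hi
  | case2 x hx hlt =>
    intro ans hi
    rw [funcLoop, loopN_eq m x hx]
    have hgt : (↑x : Int) > ↑m := by exact_mod_cast hlt
    rw [if_pos hgt, if_pos hlt]
    simp
  | case3 x hx hlt ih =>
    intro ans hi
    rw [funcLoop]
    have hgt : ¬ ((↑x : Int) > ↑m) := by exact_mod_cast hlt
    rw [if_neg hgt]
    have hc : (↑x : Int) * 2 = ↑(2 * x) := by push_cast; ring
    rw [funcLoop_congr (↑m) _ hc (by omega) (by push_cast; omega)]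
    rw [ih (ans + PySem.Int.floordiv ↑m ↑x * PySem.Int.floordiv ↑x 2) (by push_cast; omega)]
    rw [loopN_eq m x hx, if_neg hlt]
    rw [PySem.Int.floordiv_natCast]
    have hfd2 : PySem.Int.floordiv (↑x) 2 = ↑(x / 2) := by
      exact_mod_cast PySem.Int.floordiv_natCast x 2
    rw [hfd2]
    push_cast
    ring

-- shifting the loop's power index down by one halves m
theorem loopN_shift : ∀ (K m i : ℕ), m + 1 - 2 * i ≤ K → 0 < i → i % 2 = 0 →
    loopN m (2 * i) = 2 * loopN (m / 2) i := by
  intro K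
  induction K with
  | zero =>
    intro m i hK hi he
    have h1 : m < 2 * i := by omega
    have h2 : m / 2 < i := by omega
    rw [loopN_eq m (2 * i) (by omega), if_pos h1,
        loopN_eq (m / 2) i (by omega), if_pos h2]
  | succ K ih =>
    intro m i hK hi he
    by_cases hlt : m < 2 * i
    · have h2 : m / 2 < i := by omega
      rw [loopN_eq m (2 * i) (by omega), if_pos hlt,
          loopN_eq (m / 2) i (by omega), if_pos h2]
    · have h2 : ¬ (m / 2 < i) := by omega
      rw [loopN_eq m (2 * i) (by omega), if_neg hlt,
          loopN_eq (m / 2) i (by omega), if_neg h2]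
      have hrec : loopN m (2 * (2 * i)) = 2 * loopN (m / 2) (2 * i) :=
        ih m (2 * i) (by omega) (by omega) (by omega)
      rw [hrec]
      have hdd : m / (2 * i) = m / 2 / i := by
        rw [Nat.div_div_eq_div_mul]
      have h2i : 2 * i / 2 = i := by omega
      rw [hdd, h2i]
      have hieven : 2 * (i / 2) = i := by omega
      calc m / 2 / i * i + 2 * loopN (m / 2) (2 * i)
          = m / 2 / i * (2 * (i / 2)) + 2 * loopN (m / 2) (2 * i) := by rw [hieven]
        _ = 2 * (m / 2 / i * (i / 2) + loopN (m / 2) (2 * i)) := by ring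

theorem loopN_two (m : ℕ) : loopN m 2 = if m < 2 then 0 else m / 2 + 2 * loopN (m / 2) 2 := by
  rw [loopN_eq m 2 (by omega)]
  by_cases h : m < 2
  · simp [h]
  · have h4 : loopN m 4 = 2 * loopN (m / 2) 2 := by
      have := loopN_shift (m + 1) m 2 (by omega) (by omega) (by omega)
      simpa using this
    rw [if_neg h, if_neg h, show (2 * 2 : ℕ) = 4 from rfl, h4]
    have : (2 : ℕ) / 2 = 1 := by omega
    rw [this]
    ring

theorem alt_nat : ∀ m : ℕ, (↑m : Int) + ↑(loopN m 2) = func_alt (↑m) := by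
  intro m
  induction m using Nat.strong_induction_on with
  | _ m ih =>
    by_cases h : m < 2
    · rw [loopN_eq m 2 (by omega), if_pos h, func_alt]
      rw [dif_pos (show (↑m : Int) ≤ 1 by omega)]
      simp
    · rw [loopN_two, if_neg h, func_alt]
      rw [dif_neg (show ¬ ((↑m : Int) ≤ 1) by omega)]
      have hfd : PySem.Int.floordiv (↑m : Int) 2 = ↑(m / 2) := by
        exact_mod_cast PySem.Int.floordiv_natCast m 2
      rw [hfd, ← ih (m / 2) (by omega)]
      push_cast
      ring

-- ===== VERDICT (by name: the statement is the Claim_ definition above) =====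
theorem func_spec : Claim_equal_func := by
  intro n _
  unfold Spec_func
  by_cases h : n ≤ 0
  · unfold func func_alt
    rw [funcLoop]
    have : (2 : Int) > n := by omega
    rw [if_pos this, dif_pos (show n ≤ 1 by omega)]
  · have hm : n = ↑(n.toNat) := by omega
    rw [hm]
    have hA : func (↑(n.toNat)) = ↑(n.toNat) + ↑(loopN n.toNat 2) := by
      unfold func
      have := funcLoop_loopN n.toNat 2 (↑(n.toNat)) (by norm_num)
      simpa using this
    rw [hA, alt_nat n.toNat]
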